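-- pv_equiv track=rewrite | github.com/eBay/accelerator | accelerator/dataset.py | _minmax_merge
-- ===== SOURCE A (Python) =====
-- def _minmax_merge(minmax):
-- 	def minmax_fixup(a, b):
-- 		res_min = a[0]
-- 		if res_min is None: res_min = b[0]
-- 		res_max = a[1]
-- 		if res_max is None: res_max = b[1]
-- 		return [res_min, res_max]
-- 	res = {}
-- 	for part in minmax.values():
-- 		for name, mm in part.items():
-- 			mm = tuple(mm)
-- 			if mm != (None, None):
-- 				omm = minmax_fixup(res.get(name, (None, None,)), mm)
-- 				mm = minmax_fixup(mm, omm)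
-- 				res[name] = [min(mm[0], omm[0]), max(mm[1], omm[1])]
-- 	return res
-- ===== SOURCE B (Python) =====
-- def _minmax_merge(minmax):
-- 	acc = {}
-- 	for part in minmax.values():
-- 		for name, mm in part.items():
-- 			if list(mm) != [None, None]:
-- 				lo, hi = mm[0], mm[1]
-- 				if name not in acc:
-- 					acc[name] = ([], [])
-- 				mins, maxs = acc[name]
-- 				if lo is not None:
-- 					mins.append(lo)
-- 				if hi is not None:
-- 					maxs.append(hi)
-- 	return {name: [min(mins) if mins else None, max(maxs) if maxs else None]
-- 			for name, (mins, maxs) in acc.items()}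
-- ===== Notes on version B (the rewrite author's own statement) =====
-- stated objective: alternative
-- what changed: Replaces the inline running-merge with None-filling fixup by a two-phase build-an-index-then-reduce: first pass collects per-name lists of the present min/max components, registering a name at its first non-trivial entry; second pass reduces each list with min/max.
import Mathlib
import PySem

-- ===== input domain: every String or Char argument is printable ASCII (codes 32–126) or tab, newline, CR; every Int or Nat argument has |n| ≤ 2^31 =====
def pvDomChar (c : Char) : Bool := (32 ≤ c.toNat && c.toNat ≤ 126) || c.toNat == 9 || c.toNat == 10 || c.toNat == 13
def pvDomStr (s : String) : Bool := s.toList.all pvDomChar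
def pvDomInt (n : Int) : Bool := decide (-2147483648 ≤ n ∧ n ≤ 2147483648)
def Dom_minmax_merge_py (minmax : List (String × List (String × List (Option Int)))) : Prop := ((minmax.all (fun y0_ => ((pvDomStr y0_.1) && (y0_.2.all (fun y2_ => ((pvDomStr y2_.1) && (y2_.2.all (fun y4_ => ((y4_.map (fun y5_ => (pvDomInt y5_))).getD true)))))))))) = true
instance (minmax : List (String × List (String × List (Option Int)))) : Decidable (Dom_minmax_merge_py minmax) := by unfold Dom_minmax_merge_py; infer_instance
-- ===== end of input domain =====

-- B replaces A's inline running-merge (None-filling fixup + min/max against the stored pair) by a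
-- build-an-index-then-reduce decomposition: collect per-name lists of present components, then reduce
-- each with min/max; same cost, different shape (objective: alternative).
-- B mutates nothing observable; A mutates nothing observable; equivalence is about the return value.

-- ===== PORT A =====
-- minmax_fixup(a, b): fill a's None slots from b.  a[i]/b[i] is pyGetD (index errors are excluded by Pre_).
def pvFixup (a b : List (Option Int)) : List (Option Int) :=
  let resMin := PySem.List.pyGetD a 0 none
  let resMin := if resMin.isNone then PySem.List.pyGetD b 0 none else resMin
  let resMax := PySem.List.pyGetD a 1 none
  let resMax := if resMax.isNone then PySem.List.pyGetD b 1 none else resMax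
  [resMin, resMax]

-- min(x, y)/max(x, y): Python raises TypeError if either side is None; Pre_ excludes that, none marks it.
def pvOptMin (x y : Option Int) : Option Int :=
  match x, y with
  | some a, some b => some (min a b)
  | _, _ => none

def pvOptMax (x y : Option Int) : Option Int :=
  match x, y with
  | some a, some b => some (max a b)
  | _, _ => none

-- body of A's inner loop
def pvStepA (res : PySem.Dict String (List (Option Int))) (nm : String × List (Option Int)) :
    PySem.Dict String (List (Option Int)) :=
  if nm.2 ≠ [none, none] then
    let omm := pvFixup (res.getD nm.1 [none, none]) nm.2
    let mm2 := pvFixup nm.2 omm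
    res.insert nm.1 [pvOptMin (PySem.List.pyGetD mm2 0 none) (PySem.List.pyGetD omm 0 none),
                     pvOptMax (PySem.List.pyGetD mm2 1 none) (PySem.List.pyGetD omm 1 none)]
  else res

def minmax_merge_py (minmax : List (String × List (String × List (Option Int)))) : List (String × List (Option Int)) :=
  (minmax.foldl (fun res part => part.2.foldl pvStepA res)
    (PySem.Dict.empty : PySem.Dict String (List (Option Int)))).items

-- ===== PORT B =====
-- body of B's collecting loop: register name at first non-trivial entry, append present components
def pvStepB (acc : PySem.Dict String (List Int × List Int)) (nm : String × List (Option Int)) :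
    PySem.Dict String (List Int × List Int) :=
  if nm.2 ≠ [none, none] then
    let lo := PySem.List.pyGetD nm.2 0 none
    let hi := PySem.List.pyGetD nm.2 1 none
    let acc := if acc.contains nm.1 then acc else acc.insert nm.1 ([], [])
    let p := acc.getD nm.1 ([], [])
    let mins := match lo with | some v => p.1 ++ [v] | none => p.1
    let maxs := match hi with | some v => p.2 ++ [v] | none => p.2
    acc.insert nm.1 (mins, maxs)
  else acc

def minmax_merge_py_alt (minmax : List (String × List (String × List (Option Int)))) : List (String × List (Option Int)) :=
  let acc : PySem.Dict String (List Int × List Int) :=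
    minmax.foldl (fun acc part => part.2.foldl pvStepB acc) PySem.Dict.empty
  acc.items.map (fun p => (p.1, [PySem.List.min? p.2.1 (fun y => y), PySem.List.max? p.2.2 (fun y => y)]))

-- ===== PRECONDITION & SPEC =====
-- Pre_ is exactly where A returns: every non-trivial entry (one that is not the all-None pair) has
-- length ≥ 2 (else IndexError in minmax_fixup) and, per name, the first non-trivial entry has both
-- of its first two components present (else min/max compares None: TypeError).
def Pre_minmax_merge_py (minmax : List (String × List (String × List (Option Int)))) : Prop :=
  (∀ p ∈ minmax.flatMap Prod.snd, p.2 ≠ [none, none] → 2 ≤ p.2.length) ∧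
  (∀ p ∈ minmax.flatMap Prod.snd,
    ((minmax.flatMap Prod.snd).filter
        (fun r => decide (r.1 = p.1) && decide (r.2 ≠ [none, none]))).head?.all
      (fun q => (PySem.List.pyGetD q.2 0 none).isSome && (PySem.List.pyGetD q.2 1 none).isSome) = true)
instance (minmax : List (String × List (String × List (Option Int)))) : Decidable (Pre_minmax_merge_py minmax) := by unfold Pre_minmax_merge_py; infer_instance

def pvWitness_minmax_merge_py : (List (String × List (String × List (Option Int)))) :=
  [("p", [("x", [some 1, some 2]), ("y", [none, none])]), ("q", [("x", [none, some 5])])]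

def Spec_minmax_merge_py (minmax : List (String × List (String × List (Option Int)))) (out : List (String × List (Option Int))) : Prop := out = minmax_merge_py_alt minmax
instance (minmax : List (String × List (String × List (Option Int)))) (out : List (String × List (Option Int))) : Decidable (Spec_minmax_merge_py minmax out) := by unfold Spec_minmax_merge_py; infer_instance

-- ===== CLAIM (what is proved, stated in full; the proofs are below) =====
def Claim_equal_minmax_merge_py : Prop := ∀ (minmax : List (String × List (String × List (Option Int)))), Dom_minmax_merge_py minmax → Pre_minmax_merge_py minmax → Spec_minmax_merge_py minmax (minmax_merge_py minmax)

-- ===== LEMMAS AND PROOFS =====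

-- the reduction applied to each indexed entry by B's second pass
def pvPost (p : String × (List Int × List Int)) : String × List (Option Int) :=
  (p.1, [PySem.List.min? p.2.1 (fun y => y), PySem.List.max? p.2.2 (fun y => y)])

lemma pv_keys_eq (resA : PySem.Dict String (List (Option Int))) (acc : PySem.Dict String (List Int × List Int))
    (h : resA.items = acc.items.map pvPost) : resA.keys = acc.keys := by
  simp only [PySem.Dict.keys, h, List.map_map]
  exact List.map_congr_left (fun p _ => rfl)

lemma pv_contains_eq (resA : PySem.Dict String (List (Option Int))) (acc : PySem.Dict String (List Int × List Int))
    (h : resA.items = acc.items.map pvPost) (n : String) : resA.contains n = acc.contains n := by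
  rw [PySem.Dict.contains_eq_decide_mem_keys, PySem.Dict.contains_eq_decide_mem_keys, pv_keys_eq _ _ h]

lemma pv_min_append (x : Int) (t : List Int) (lo : Option Int) :
    PySem.List.min? ((x :: t) ++ lo.toList) (fun y => y)
      = pvOptMin (if lo.isNone then some (t.foldl min x) else lo) (some (t.foldl min x)) := by
  cases lo with
  | none => simp [PySem.List.min?_id_cons, pvOptMin]
  | some a =>
      rw [List.cons_append, PySem.List.min?_id_cons, List.foldl_append]
      simp [pvOptMin, min_comm]

lemma pv_max_append (y : Int) (t : List Int) (hi : Option Int) :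
    PySem.List.max? ((y :: t) ++ hi.toList) (fun z => z)
      = pvOptMax (if hi.isNone then some (t.foldl max y) else hi) (some (t.foldl max y)) := by
  cases hi with
  | none => simp [PySem.List.max?_id_cons, pvOptMax]
  | some a =>
      rw [List.cons_append, PySem.List.max?_id_cons, List.foldl_append]
      simp [pvOptMax, max_comm]

lemma pv_main : ∀ (l : List (String × List (Option Int)))
    (resA : PySem.Dict String (List (Option Int))) (acc : PySem.Dict String (List Int × List Int)),
    acc.keys.Nodup →
    resA.items = acc.items.map pvPost →
    (∀ p ∈ acc.items, p.2.1 ≠ [] ∧ p.2.2 ≠ []) →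
    (∀ p ∈ l, p.2 ≠ [none, none] → 2 ≤ p.2.length) →
    (∀ n, acc.contains n = false →
      ∀ q, (l.filter (fun r => decide (r.1 = n) && decide (r.2 ≠ [none, none]))).head? = some q →
        (PySem.List.pyGetD q.2 0 none).isSome = true ∧ (PySem.List.pyGetD q.2 1 none).isSome = true) →
    (l.foldl pvStepA resA).items = ((l.foldl pvStepB acc).items).map pvPost
  | [], resA, acc, hnd, hit, hne, h2, h3 => by simpa using hit
  | p :: l, resA, acc, hnd, hit, hne, h2, h3 => by
    have hndA : resA.keys.Nodup := by rw [pv_keys_eq resA acc hit]; exact hnd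
    by_cases hnt : p.2 = [none, none]
    · have hsA : pvStepA resA p = resA := by simp [pvStepA, hnt]
      have hsB : pvStepB acc p = acc := by simp [pvStepB, hnt]
      rw [List.foldl_cons, List.foldl_cons, hsA, hsB]
      refine pv_main l resA acc hnd hit hne (fun q hq => h2 q (List.mem_cons_of_mem _ hq)) ?_
      intro n hc q hq
      refine h3 n hc q ?_
      rwa [List.filter_cons_of_neg (by simp [hnt])]
    · obtain ⟨lo, hi, rest, hsh⟩ : ∃ lo hi rest, p.2 = lo :: hi :: rest := by
        have hlen := h2 p List.mem_cons_self hnt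
        match hm : p.2 with
        | a :: b :: t => exact ⟨a, b, t, rfl⟩
        | [] => rw [hm] at hlen; simp at hlen
        | [a] => rw [hm] at hlen; simp at hlen
      have hglo : PySem.List.pyGetD p.2 0 none = lo := by rw [hsh]; simp [PySem.List.pyGetD]
      have hghi : PySem.List.pyGetD p.2 1 none = hi := by rw [hsh]; simp [PySem.List.pyGetD]
      by_cases hc : acc.contains p.1 = true
      · -- existing name
        obtain ⟨pr, hpr⟩ : ∃ v, acc.get? p.1 = some v := by
          rw [PySem.Dict.contains_eq_isSome_get?] at hc; exact Option.isSome_iff_exists.mp hc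
        obtain ⟨mins, maxs⟩ := pr
        have hmem : (p.1, (mins, maxs)) ∈ acc.items := PySem.Dict.mem_items_of_get?_eq_some acc hpr
        obtain ⟨hmne, hxne⟩ := hne _ hmem
        obtain ⟨x, tx, hx⟩ : ∃ x tx, mins = x :: tx := by cases mins with
          | nil => exact absurd rfl hmne | cons a t => exact ⟨a, t, rfl⟩
        obtain ⟨y, ty, hy⟩ : ∃ y ty, maxs = y :: ty := by cases maxs with
          | nil => exact absurd rfl hxne | cons a t => exact ⟨a, t, rfl⟩
        have hmemA : (p.1, [PySem.List.min? mins (fun z => z), PySem.List.max? maxs (fun z => z)]) ∈ resA.items := by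
          rw [hit]
          exact List.mem_map_of_mem hmem
        have hgA : resA.getD p.1 [none, none]
            = [some (tx.foldl min x), some (ty.foldl max y)] := by
          have := PySem.Dict.getD_of_mem_items resA hmemA hndA [none, none]
          rwa [hx, hy, PySem.List.min?_id_cons, PySem.List.max?_id_cons] at this
        have hgB : acc.getD p.1 ([], []) = (mins, maxs) := by
          rw [PySem.Dict.getD_eq_get?_getD, hpr]; rfl
        have hcA : resA.contains p.1 = true := by rw [pv_contains_eq resA acc hit]; exact hc
        set m := tx.foldl min x with hm
        set M := ty.foldl max y with hM
        have hsA : pvStepA resA p = resA.insert p.1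
            [pvOptMin (if lo.isNone then some m else lo) (some m),
             pvOptMax (if hi.isNone then some M else hi) (some M)] := by
          simp only [pvStepA, if_pos hnt, pvFixup, hgA, hglo, hghi]
          simp [PySem.List.pyGetD]
        have hsB : pvStepB acc p = acc.insert p.1
            (mins ++ lo.toList, maxs ++ hi.toList) := by
          simp only [pvStepB, if_pos hnt, hc, hglo, hghi]
          cases lo <;> cases hi <;> simp [hgB]
        rw [List.foldl_cons, List.foldl_cons, hsA, hsB]
        refine pv_main l _ _ (PySem.Dict.nodup_keys_insert _ _ _ hnd) ?_ ?_
          (fun q hq => h2 q (List.mem_cons_of_mem _ hq)) ?_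
        · rw [PySem.Dict.items_insert_of_contains _ _ hcA, PySem.Dict.items_insert_of_contains _ _ hc,
            hit, List.map_map, List.map_map]
          refine List.map_congr_left ?_
          intro q hq
          simp only [Function.comp]
          by_cases hq1 : q.1 = p.1
          · have : acc.get? q.1 = some q.2 := PySem.Dict.get?_of_mem_items acc (by simpa using hq) hnd
            rw [hq1, hpr] at this
            have hq2 : q.2 = (mins, maxs) := by injection this with h; exact h.symm
            simp only [pvPost, hq1, beq_self_eq_true, if_pos, hq2, hx, hy,
              pv_min_append, pv_max_append]
            rfl
          · have hb : (q.1 == p.1) = false := beq_false_of_ne hq1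
            simp [pvPost, hb]
        · intro q hq
          rw [PySem.Dict.mem_items_insert] at hq
          rcases hq with hq | hq
          · subst hq
            constructor <;> simp [hx, hy]
          · exact hne _ hq.1
        · intro n hcn q hq
          rw [PySem.Dict.contains_insert] at hcn
          simp only [Bool.or_eq_false_iff, beq_eq_false_iff_ne] at hcn
          refine h3 n hcn.2 q ?_
          rwa [List.filter_cons_of_neg (by simp [Ne.symm hcn.1])] 
      · -- new name
        have hcb : acc.contains p.1 = false := by simpa using hc
        have hcbA : resA.contains p.1 = false := by rw [pv_contains_eq resA acc hit]; exact hcb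
        obtain ⟨hlos, hhis⟩ := h3 p.1 hcb p (by
          rw [List.filter_cons_of_pos (by simp [hnt])]; rfl)
        obtain ⟨a, ha⟩ : ∃ a, lo = some a := by
          rw [hglo] at hlos; exact Option.isSome_iff_exists.mp hlos
        obtain ⟨b, hb⟩ : ∃ b, hi = some b := by
          rw [hghi] at hhis; exact Option.isSome_iff_exists.mp hhis
        have hgA : resA.getD p.1 [none, none] = [none, none] :=
          PySem.Dict.getD_of_not_contains resA _ hcbA
        have hsA : pvStepA resA p = resA.insert p.1 [some a, some b] := by
          simp only [pvStepA, if_pos hnt, pvFixup, hgA, hglo, hghi, ha]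
          simp [PySem.List.pyGetD, hb, pvOptMin, pvOptMax]
        have hsB : pvStepB acc p = acc.insert p.1 ([a], [b]) := by
          simp [pvStepB, hnt, hcb, hglo, hghi, ha, hb,
            PySem.Dict.getD_insert_self, PySem.Dict.insert_insert_self]
        rw [List.foldl_cons, List.foldl_cons, hsA, hsB]
        refine pv_main l _ _ (PySem.Dict.nodup_keys_insert _ _ _ hnd) ?_ ?_
          (fun q hq => h2 q (List.mem_cons_of_mem _ hq)) ?_
        · rw [PySem.Dict.items_insert_of_not_contains resA _ hcbA,
            PySem.Dict.items_insert_of_not_contains acc _ hcb, hit, List.map_append]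
          simp [pvPost, PySem.List.min?_id_cons, PySem.List.max?_id_cons]
        · intro q hq
          rw [PySem.Dict.mem_items_insert] at hq
          rcases hq with hq | hq
          · subst hq; constructor <;> simp
          · exact hne _ hq.1
        · intro n hcn q hq
          rw [PySem.Dict.contains_insert] at hcn
          simp only [Bool.or_eq_false_iff, beq_eq_false_iff_ne] at hcn
          refine h3 n hcn.2 q ?_
          rwa [List.filter_cons_of_neg (by simp [Ne.symm hcn.1])]
termination_by l => l.length

lemma pv_nested_eq_flat {σ : Type} (step : σ → (String × List (Option Int)) → σ)
    (l : List (String × List (String × List (Option Int)))) (d : σ) :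
    l.foldl (fun r part => part.2.foldl step r) d = (l.flatMap Prod.snd).foldl step d := by
  induction l generalizing d with
  | nil => rfl
  | cons p rest ih => simp [List.foldl_append, ih]

-- ===== VERDICT (by name: the statement is the Claim_ definition above) =====
theorem minmax_merge_py_spec : Claim_equal_minmax_merge_py := by
  intro minmax _ hpre
  unfold Spec_minmax_merge_py minmax_merge_py minmax_merge_py_alt
  show (minmax.foldl (fun res part => part.2.foldl pvStepA res) PySem.Dict.empty).items
      = List.map pvPost (minmax.foldl (fun acc part => part.2.foldl pvStepB acc) PySem.Dict.empty).items
  rw [pv_nested_eq_flat pvStepA, pv_nested_eq_flat pvStepB]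
  refine pv_main (minmax.flatMap Prod.snd) _ _ (by simp [PySem.Dict.keys, PySem.Dict.empty]) rfl
    (by simp [PySem.Dict.empty]) hpre.1 ?_
  intro n _ q hq
  have hqm := List.mem_of_mem_head? hq
  rw [List.mem_filter] at hqm
  obtain ⟨hqf, hpred⟩ := hqm
  simp only [Bool.and_eq_true, decide_eq_true_eq] at hpred
  have h2 := hpre.2 q hqf
  rw [← hpred.1] at hq
  rw [hq] at h2
  simpa using h2
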